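-- pv_equiv track=rewrite | github.com/ChuloIva/motivation_vectors | src/motivation_vectors/weight_analysis.py | prepare_neutral_prompts
-- ===== SOURCE A (Python) =====
-- from typing import Dict, List, Tuple, Optional, Any, Callable
--
-- def prepare_neutral_prompts(num_prompts: int = 100) -> List[str]:
--     """
--     Generate neutral prompts for weight delta analysis.
--
--     These should be content-neutral to isolate the model difference
--     rather than prompt-specific effects.
--
--     Args:
--         num_prompts: Number of prompts to generate
--
--     Returns:
--         List of neutral prompt strings
--     """
--     # Mix of different prompt types
--     templates = [
--         "The answer is",
--         "In this case",
--         "To summarize",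
--         "This means that",
--         "For example",
--         "Consider the following",
--         "One approach is to",
--         "The key point is",
--         "It's important to note",
--         "First, we need to"
--     ]
--
--     prompts = []
--     for i in range(num_prompts):
--         template = templates[i % len(templates)]
--         prompts.append(template)
--
--     return prompts
-- ===== SOURCE B (Python) =====
-- from typing import List
--
-- def prepare_neutral_prompts(num_prompts: int = 100) -> List[str]:
--     templates = [
--         "The answer is",
--         "In this case",
--         "To summarize",
--         "This means that",
--         "For example",
--         "Consider the following",
--         "One approach is to",
--         "The key point is",
--         "It's important to note",
--         "First, we need to"
--     ]
--     if num_prompts <= 0: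
--         return []
--     out = list(templates)
--     while len(out) < num_prompts:
--         out += out          # double the cyclic block
--     return out[:num_prompts]
-- ===== Notes on version B (the rewrite author's own statement) =====
-- stated objective: alternative
-- what changed: Replaces A's per-element loop with modular indexing by repeated doubling of the template block (out += out) until it reaches the requested length, then a single truncating slice; O(log n) concatenation steps instead of n indexed appends.
import Mathlib
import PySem

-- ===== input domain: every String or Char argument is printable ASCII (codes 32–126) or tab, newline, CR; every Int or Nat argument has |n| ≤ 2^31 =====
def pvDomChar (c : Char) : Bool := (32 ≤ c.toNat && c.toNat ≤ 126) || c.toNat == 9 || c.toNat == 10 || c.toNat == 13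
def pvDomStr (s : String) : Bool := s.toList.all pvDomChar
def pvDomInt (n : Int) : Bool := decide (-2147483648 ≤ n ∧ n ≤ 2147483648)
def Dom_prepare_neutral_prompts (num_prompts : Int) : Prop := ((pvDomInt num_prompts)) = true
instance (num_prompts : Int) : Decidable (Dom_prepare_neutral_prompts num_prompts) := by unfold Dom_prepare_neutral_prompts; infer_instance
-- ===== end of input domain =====

-- B grows the template block by repeated doubling and truncates with one slice, instead of A's
-- per-element loop with modular indexing (alternative decomposition).

-- ===== PORT A =====
def pvTemplatesA : List String :=
  ["The answer is", "In this case", "To summarize", "This means that", "For example",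
   "Consider the following", "One approach is to", "The key point is",
   "It's important to note", "First, we need to"]

-- templates[i % len(templates)]: the index is always in [0, len), so Python never raises;
-- pyGetD's default is never used (exact).
def prepare_neutral_prompts (num_prompts : Int) : List String :=
  (PySem.List.pyRange 0 num_prompts 1).foldl
    (fun prompts i =>
      prompts ++ [PySem.List.pyGetD pvTemplatesA (PySem.Int.mod i (pvTemplatesA.length : Int)) ""])
    []

-- ===== PORT B =====
def pvTemplatesB : List String :=
  ["The answer is", "In this case", "To summarize", "This means that", "For example",
   "Consider the following", "One approach is to", "The key point is",
   "It's important to note", "First, we need to"]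

-- the `while len(out) < num_prompts: out += out` loop; terminates since out is nonempty.
def pvGrow (n : Nat) (xs : List String) (h : xs ≠ []) : List String :=
  if _hlt : xs.length < n then
    pvGrow n (xs ++ xs) (by intro he; exact h (List.append_eq_nil_iff.mp he).1)
  else xs
termination_by n - xs.length
decreasing_by
  have hp : 0 < xs.length := List.length_pos_iff.mpr h
  simp only [List.length_append]; omega

-- out[:num_prompts] is a slice (num_prompts > 0 on that branch).
def prepare_neutral_prompts_alt (num_prompts : Int) : List String :=
  if num_prompts ≤ 0 then []
  else PySem.List.slice (pvGrow num_prompts.toNat pvTemplatesB (by decide)) none (some num_prompts)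

-- ===== PRECONDITION & SPEC =====
def Spec_prepare_neutral_prompts (num_prompts : Int) (out : List String) : Prop := out = prepare_neutral_prompts_alt num_prompts
instance (num_prompts : Int) (out : List String) : Decidable (Spec_prepare_neutral_prompts num_prompts out) := by unfold Spec_prepare_neutral_prompts; infer_instance

-- ===== CLAIM (what is proved, stated in full; the proofs are below) =====
def Claim_equal_prepare_neutral_prompts : Prop := ∀ (num_prompts : Int), Dom_prepare_neutral_prompts num_prompts → Spec_prepare_neutral_prompts num_prompts (prepare_neutral_prompts num_prompts)

-- ===== LEMMAS AND PROOFS =====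

-- A's fold-with-append over range is the map over range.
theorem pv_foldl_append_map {α β : Type} (f : α → β) (l : List α) (acc : List β) :
    l.foldl (fun ps i => ps ++ [f i]) acc = acc ++ l.map f := by
  induction l generalizing acc with
  | nil => simp
  | cons x xs ih => simp [List.foldl, ih, List.append_assoc]

-- Element of a replicated-and-flattened list: index modulo the block length.
theorem pv_getElem_flatten_replicate {α : Type} (xs : List α) (r k : Nat)
    (hk : k < (List.flatten (List.replicate r xs)).length) :
    (List.flatten (List.replicate r xs))[k] = xs[k % xs.length]'(by
      have hlen : (List.flatten (List.replicate r xs)).length = r * xs.length := by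
        simp [List.length_flatten, List.map_replicate, List.sum_replicate]
      have hx : xs.length ≠ 0 := by
        intro h0; rw [hlen, h0] at hk; omega
      exact Nat.mod_lt _ (Nat.pos_of_ne_zero hx)) := by
  induction r generalizing k with
  | zero => simp at hk
  | succ r ih =>
    simp only [List.replicate_succ, List.flatten_cons] at hk ⊢
    by_cases h : k < xs.length
    · rw [List.getElem_append_left h]
      congr 1
      exact (Nat.mod_eq_of_lt h).symm
    · rw [not_lt] at h
      have hk' : k - xs.length < (List.flatten (List.replicate r xs)).length := by
        rw [List.length_append] at hk; omega
      rw [List.getElem_append_right h]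
      rw [ih (k - xs.length) hk']
      congr 1
      conv_rhs => rw [← Nat.sub_add_cancel h]
      rw [Nat.add_mod_right]

-- the doubling loop keeps the list a whole number of template blocks and stops only at length ≥ n
theorem pvGrow_flat (n : Nat) (r : Nat) (hr : 0 < r)
    (h : List.flatten (List.replicate r pvTemplatesB) ≠ []) :
    ∃ r', 0 < r' ∧
      pvGrow n (List.flatten (List.replicate r pvTemplatesB)) h
        = List.flatten (List.replicate r' pvTemplatesB) ∧
      n ≤ r' * 10 := by
  have hlen : ∀ m : Nat, (List.flatten (List.replicate m pvTemplatesB)).length = m * 10 := by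
    intro m
    simp [List.length_flatten, List.map_replicate, List.sum_replicate, pvTemplatesB]
  by_cases hlt : (List.flatten (List.replicate r pvTemplatesB)).length < n
  · have hdouble : List.flatten (List.replicate r pvTemplatesB)
        ++ List.flatten (List.replicate r pvTemplatesB)
        = List.flatten (List.replicate (r + r) pvTemplatesB) := by
      rw [← List.flatten_append, ← List.replicate_add]
    rw [pvGrow, dif_pos hlt]
    have h2 : List.flatten (List.replicate (r + r) pvTemplatesB) ≠ [] := by
      rw [← hdouble]; intro he; exact h (List.append_eq_nil_iff.mp he).1
    have ih := pvGrow_flat n (r + r) (by omega) h2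
    obtain ⟨r', hr', heq, hle⟩ := ih
    refine ⟨r', hr', ?_, hle⟩
    rw [← heq]
    congr 1
  · rw [pvGrow, dif_neg hlt]
    refine ⟨r, hr, rfl, ?_⟩
    rw [hlen r] at hlt
    omega
termination_by n - r * 10
decreasing_by
  have hl : (List.replicate r pvTemplatesB).flatten.length = r * 10 := by
    simp [pvTemplatesB]
  omega

-- the doubling loop on the template block itself (the templates are one block)
theorem pvGrow_templates (n : Nat) (h : pvTemplatesB ≠ []) :
    ∃ r', 0 < r' ∧
      pvGrow n pvTemplatesB h = List.flatten (List.replicate r' pvTemplatesB) ∧ n ≤ r' * 10 := by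
  have h1 : List.flatten (List.replicate 1 pvTemplatesB) ≠ [] := by decide
  have he : pvGrow n pvTemplatesB h
      = pvGrow n (List.flatten (List.replicate 1 pvTemplatesB)) h1 := by
    congr 1
  rw [he]
  exact pvGrow_flat n 1 one_pos h1

theorem prepare_neutral_prompts_eq (num_prompts : Int) :
    prepare_neutral_prompts num_prompts = prepare_neutral_prompts_alt num_prompts := by
  unfold prepare_neutral_prompts prepare_neutral_prompts_alt
  by_cases hneg : num_prompts ≤ 0
  · rw [PySem.List.pyRange_one_eq_nil (by omega), if_pos hneg]
    simp
  · rw [if_neg hneg]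
    rw [not_le] at hneg
    set n : Nat := num_prompts.toNat with hn
    have hnum : num_prompts = (n : Int) := by omega
    rw [hnum]
    rw [PySem.List.pyRange_zero_natCast]
    rw [pv_foldl_append_map]
    rw [PySem.List.slice_to_natCast]
    obtain ⟨r', hr', heq, hle⟩ := pvGrow_templates n (by decide)
    rw [heq]
    have hflatlen : (List.flatten (List.replicate r' pvTemplatesB)).length = r' * 10 := by
      simp [List.length_flatten, List.map_replicate, List.sum_replicate, pvTemplatesB]
    rw [List.nil_append]
    apply List.ext_getElem
    · simp [hflatlen]
      omega
    · intro k h1k h2k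
      have hk : k < n := by
        simpa [PySem.List.length_pyRange_one] using h1k
      have hkflat : k < (List.flatten (List.replicate r' pvTemplatesB)).length := by
        rw [hflatlen]; omega
      rw [List.getElem_take]
      rw [pv_getElem_flatten_replicate _ _ _ hkflat]
      simp only [List.getElem_map, List.getElem_range]
      have hlenA : pvTemplatesA.length = 10 := by decide
      rw [hlenA]
      rw [PySem.Int.mod_natCast k 10]
      rw [PySem.List.pyGetD_natCast]
      have hmlt : k % 10 < pvTemplatesA.length := by
        have : k % 10 < 10 := Nat.mod_lt _ (by omega)
        simpa [show pvTemplatesA.length = 10 from by decide]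
      rw [List.getD_eq_getElem _ _ hmlt]
      have hB : pvTemplatesB.length = 10 := by decide
      congr 1

-- ===== VERDICT (by name: the statement is the Claim_ definition above) =====
theorem prepare_neutral_prompts_spec : Claim_equal_prepare_neutral_prompts := by
  intro n _
  unfold Spec_prepare_neutral_prompts
  exact prepare_neutral_prompts_eq n
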